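-- pv_equiv track=rewrite | github.com/CoopGod/optimal-course-selector | pre-reqs.py | find_best_options
-- ===== SOURCE A (Python) =====
-- def find_best_options(course_lists: list[str]) -> tuple[list[str], list[list[str]]]:
--     """
--     Uses a greedy algorithm to find to best possible courses.
--     The goal being the smallest amount of courses possible
--     """
--     # create dictionary with courses as key values, adding for duplicates found
--     course_duplicates = {}
--     for course_list in course_lists:
--         for course in course_list:
--             result = course_duplicates.get(course, None)
--             if result == None:
--                 course_duplicates[course] = 1
--             else:
--                 course_duplicates[course] = result + 1
--
--     # search course lists for best option
--     best_options = []
--     undecided_options = []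
--     for course_list in course_lists:
--         best_option = []
--         best_value = 0
--         for course in course_list:
--             # check against duplicates. search for highest
--             current_course_value = course_duplicates.get(course)
--
--             # if best current option, remove other and update value
--             if current_course_value > best_value:
--                 best_option = [course]
--                 best_value = current_course_value
--
--             # if tied as best current option, add to array
--             elif current_course_value == best_value:
--                 best_option.append(course)
--
--         # if only one best option, it must be best
--         if len(best_option) == 1:
--             for option in best_option:
--                 best_options.append(option)
--         # if there is a tie between best options, add to separate array
--         else:
--             undecided_options.append(best_option)
--
--     # remove duplicates and return
--     best_options = list(dict.fromkeys(best_options))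
--     return best_options, undecided_options
-- ===== SOURCE B (Python) =====
-- def find_best_options(course_lists):
--     # one flat pass of counting
--     flat = [c for cl in course_lists for c in cl]
--     counts = {}
--     for c in flat:
--         counts[c] = counts.get(c, 0) + 1
--
--     # group a list's courses into count-indexed buckets; the answer for the
--     # list is the bucket stored under the largest count (no comparisons
--     # during the scan, no tie bookkeeping)
--     def best_of(cl):
--         buckets = {}
--         for c in cl:
--             buckets.setdefault(counts[c], []).append(c)
--         return buckets[max(buckets)] if buckets else []
--
--     # staged pipeline: all bests first, then partition into singles and ties
--     bests = [best_of(cl) for cl in course_lists]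
--     singles = [b[0] for b in bests if len(b) == 1]
--     ties = [b for b in bests if len(b) != 1]
--     return list(dict.fromkeys(singles)), ties
-- ===== Notes on version B (the rewrite author's own statement) =====
-- stated objective: alternative
-- what changed: A's running-max scan with tie reset/append per list is replaced by grouping each list into count-indexed dict buckets and returning the bucket stored under the largest key, and A's single loop with two accumulators is replaced by a staged map-then-partition pipeline (all per-list bests first, then two comprehensions split singles from ties).
import Mathlib
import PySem

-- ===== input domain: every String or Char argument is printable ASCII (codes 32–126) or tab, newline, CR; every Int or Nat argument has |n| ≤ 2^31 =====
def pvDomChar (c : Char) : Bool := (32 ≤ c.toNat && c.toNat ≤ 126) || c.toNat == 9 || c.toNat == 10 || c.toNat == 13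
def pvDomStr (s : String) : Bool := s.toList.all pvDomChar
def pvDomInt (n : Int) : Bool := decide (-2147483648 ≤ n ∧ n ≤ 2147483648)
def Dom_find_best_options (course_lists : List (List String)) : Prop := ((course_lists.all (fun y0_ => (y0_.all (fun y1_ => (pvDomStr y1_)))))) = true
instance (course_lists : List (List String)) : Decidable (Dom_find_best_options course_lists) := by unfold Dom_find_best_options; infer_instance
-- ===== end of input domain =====

-- B replaces A's running-max/tie-reset scan by grouping each list into count-indexed
-- buckets and taking the bucket of the largest key, and A's dual-accumulator loop by a
-- staged map-then-partition pipeline; objective: alternative (same cost).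

-- ===== PORT A =====
def find_best_options (course_lists : List (List String)) : List String × List (List String) :=
  let course_duplicates : PySem.Dict String Int :=
    course_lists.foldl (fun d course_list =>
      course_list.foldl (fun d course =>
        match d.get? course with
        | none => d.insert course 1
        | some r => d.insert course (r + 1)) d) PySem.Dict.empty
  let st :=
    course_lists.foldl (fun (st : List String × List (List String)) course_list =>
      let s := course_list.foldl (fun (s : List String × Int) course =>
        -- course_duplicates.get(course): the key is always present, so .get never yields None
        let current := course_duplicates.getD course 0
        if current > s.2 then ([course], current)
        else if current = s.2 then (s.1 ++ [course], s.2)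
        else s) ([], 0)
      if s.1.length = 1 then (s.1.foldl (fun b o => b ++ [o]) st.1, st.2)
      else (st.1, st.2 ++ [s.1])) ([], [])
  (PySem.List.dedup st.1, st.2)

-- ===== PORT B =====
-- helper best_of: group cl into count-indexed buckets, return the bucket of the max key
def bestOf (counts : PySem.Dict String Int) (cl : List String) : List String :=
  let buckets : PySem.Dict Int (List String) :=
    -- counts[c] is always present (every c of cl occurs in flat), so .getD c 0 is exact;
    -- setdefault(k, []).append(c) is d.modify k [] (· ++ [c])
    cl.foldl (fun d c => d.modify (counts.getD c 0) [] (· ++ [c])) PySem.Dict.empty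
  -- `buckets[max(buckets)] if buckets else []`: max over the nonempty key list is some,
  -- and the looked-up key is present, so the two getD defaults are never reached
  if buckets.size ≠ 0 then
    buckets.getD ((PySem.List.max? buckets.keys (fun k => k)).getD 0) []
  else []

def find_best_options_alt (course_lists : List (List String)) : List String × List (List String) :=
  let flat := course_lists.flatMap (fun cl => cl)
  let counts : PySem.Dict String Int :=
    flat.foldl (fun d c => d.insert c (d.getD c 0 + 1)) PySem.Dict.empty
  let bests := course_lists.map (fun cl => bestOf counts cl)
  -- b[0] on a length-1 list is headI — exact
  let singles := (bests.filter (fun b => b.length == 1)).map (fun b => b.headI)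
  let ties := bests.filter (fun b => b.length != 1)
  (PySem.List.dedup singles, ties)

-- ===== PRECONDITION & SPEC =====
def Spec_find_best_options (course_lists : List (List String)) (out : List String × List (List String)) : Prop := out = find_best_options_alt course_lists
instance (course_lists : List (List String)) (out : List String × List (List String)) : Decidable (Spec_find_best_options course_lists out) := by unfold Spec_find_best_options; infer_instance

-- ===== CLAIM (what is proved, stated in full; the proofs are below) =====
def Claim_equal_find_best_options : Prop := ∀ (course_lists : List (List String)), Dom_find_best_options course_lists → Spec_find_best_options course_lists (find_best_options course_lists)

-- ===== LEMMAS AND PROOFS =====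

-- A's counting step is Dict.modify
theorem stepA_eq_modify (d : PySem.Dict String Int) (c : String) :
    (match d.get? c with
     | none => d.insert c 1
     | some r => d.insert c (r + 1)) = d.modify c 0 (· + 1) := by
  simp only [PySem.Dict.modify, PySem.Dict.getD]
  cases d.get? c <;> simp

-- A's running-max inner loop computes the filter of the max
theorem innerA (f : String → Int) (l : List String) :
    ∀ (bo : List String) (bv : Int),
    l.foldl (fun (s : List String × Int) c =>
      if f c > s.2 then ([c], f c)
      else if f c = s.2 then (s.1 ++ [c], s.2)
      else s) (bo, bv)
    = ((if l.foldl (fun a c => max a (f c)) bv = bv then bo else [])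
         ++ l.filter (fun c => decide (f c = l.foldl (fun a c => max a (f c)) bv)),
       l.foldl (fun a c => max a (f c)) bv) := by
  induction l with
  | nil => intro bo bv; simp
  | cons c t ih =>
    intro bo bv
    have hle := (PySem.List.le_foldl_max_int t f (max bv (f c))).1
    simp only [List.foldl_cons]
    by_cases h1 : f c > bv
    · rw [if_pos h1, ih]
      have hmax : max bv (f c) = f c := by omega
      simp only [hmax] at hle ⊢
      have hne : ¬ (t.foldl (fun a c => max a (f c)) (f c) = bv) := by omega
      rw [if_neg hne]
      simp only [List.filter_cons]
      by_cases h2 : f c = t.foldl (fun a c => max a (f c)) (f c)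
      · rw [if_pos h2.symm, if_pos (decide_eq_true h2)]
        simp
      · rw [if_neg (fun h => h2 h.symm), if_neg (by simp [h2])]
    · rw [if_neg h1]
      by_cases h2 : f c = bv
      · rw [if_pos h2, ih]
        have hmax : max bv (f c) = bv := by omega
        simp only [hmax] at hle ⊢
        simp only [List.filter_cons]
        by_cases h3 : t.foldl (fun a c => max a (f c)) bv = bv
        · rw [if_pos h3, if_pos h3]
          have h4 : f c = t.foldl (fun a c => max a (f c)) bv := by omega
          simp [h4, List.append_assoc]
        · rw [if_neg h3, if_neg h3]
          have h4 : ¬ (f c = t.foldl (fun a c => max a (f c)) bv) := by omega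
          simp [h4]
      · rw [if_neg h2, ih]
        have hmax : max bv (f c) = bv := by omega
        simp only [hmax] at hle ⊢
        have h4 : ¬ (f c = t.foldl (fun a c => max a (f c)) bv) := by omega
        simp only [List.filter_cons]
        simp [h4]

-- a length-1 list is [headI]
theorem headI_singleton {α : Type} [Inhabited α] (l : List α) (h : l.length = 1) :
    [l.headI] = l := by
  cases l with
  | nil => simp at h
  | cons x t => cases t with
    | nil => simp
    | cons y u => simp at h

-- nested counting fold = counting fold over the flattened list
theorem count_flatten (L : List (List String)) :
    L.foldl (fun d course_list =>
      course_list.foldl (fun d course =>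
        match d.get? course with
        | none => d.insert course 1
        | some r => d.insert course (r + 1)) d) (PySem.Dict.empty : PySem.Dict String Int)
    = PySem.Dict.counter L.flatten := by
  rw [PySem.Dict.counter_eq_foldl, List.foldl_flatten]
  apply PySem.List.foldl_congr_mem
  intro d cl _
  apply PySem.List.foldl_congr_mem
  intro d' c _
  exact stepA_eq_modify d' c

-- proof-only abbreviation: the per-list best as a filter of the max count
def pvG (F : List String) (cl : List String) : List String :=
  cl.filter (fun c => decide ((PySem.Dict.counter F).getD c 0
    = cl.foldl (fun a c => max a ((PySem.Dict.counter F).getD c 0)) 0))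

-- the bucket selection of B equals the filter of the max count
theorem bestOf_eq_filter (counts : PySem.Dict String Int) (cl : List String)
    (h1 : ∀ c ∈ cl, 1 ≤ counts.getD c 0) :
    bestOf counts cl =
      cl.filter (fun c => decide (counts.getD c 0
        = cl.foldl (fun a c => max a (counts.getD c 0)) 0)) := by
  cases cl with
  | nil => simp [bestOf, PySem.Dict.size]
  | cons x t =>
    simp only [bestOf]
    set bk := (x :: t).foldl (fun d c => d.modify (counts.getD c 0) [] (· ++ [c]))
        PySem.Dict.empty with hbk
    have hkeys : bk.keys = PySem.Set.ofList ((x :: t).map (fun c => counts.getD c 0)) := by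
      rw [hbk, PySem.Dict.keys_foldl_modify_key (x :: t) (fun c => counts.getD c 0) []
        (fun _ c v => v ++ [c])]
      rfl
    have hxmem : counts.getD x 0 ∈ bk.keys := by
      rw [hkeys, PySem.Set.mem_ofList]
      exact List.mem_map_of_mem (by simp)
    have hknil : bk.keys ≠ [] := fun h => by simp [h] at hxmem
    have hsz : bk.size ≠ 0 := by
      have hlen : bk.size = bk.keys.length := by
        simp [PySem.Dict.size, PySem.Dict.keys]
      rw [hlen]
      simpa using hknil
    rw [if_pos hsz]
    rcases hm : PySem.List.max? bk.keys (fun k => k) with _ | m0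
    · exact absurd ((PySem.List.max?_eq_none_iff _ _).1 hm) hknil
    have hm0mem : m0 ∈ bk.keys := PySem.List.max?_mem hm
    have hm0max : ∀ y ∈ bk.keys, y ≤ m0 := PySem.List.max?_isMax hm
    have hle := PySem.List.le_foldl_max_int (x :: t) (fun c => counts.getD c 0) 0
    have hMfold : (x :: t).foldl (fun a c => max a (counts.getD c 0)) 0
        = ((x :: t).map (fun c => counts.getD c 0)).foldl max 0 :=
      List.foldl_map.symm
    have hm0M : m0 = (x :: t).foldl (fun a c => max a (counts.getD c 0)) 0 := by
      have hup : m0 ≤ (x :: t).foldl (fun a c => max a (counts.getD c 0)) 0 := by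
        have hmem : m0 ∈ (x :: t).map (fun c => counts.getD c 0) := by
          rw [hkeys, PySem.Set.mem_ofList] at hm0mem
          exact hm0mem
        rcases List.mem_map.1 hmem with ⟨c, hc, hfc⟩
        have := hle.2 c hc
        simpa [hfc] using this
      have hdown : (x :: t).foldl (fun a c => max a (counts.getD c 0)) 0 ≤ m0 := by
        rcases PySem.List.foldl_max_mem ((x :: t).map (fun c => counts.getD c 0)) 0 with h0 | hmem
        · exfalso
          have hx1 : 1 ≤ counts.getD x 0 := h1 x (by simp)
          have hxle := hle.2 x (by simp)
          simp only [] at hxle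
          rw [hMfold] at hxle
          omega
        · refine hm0max _ ?_
          rw [hkeys, PySem.Set.mem_ofList, hMfold]
          exact hmem
      omega
    have hpairs : ((x :: t).map (fun c => (counts.getD c 0, c))).foldl
        (fun d p => d.modify p.1 [] (· ++ [p.2])) PySem.Dict.empty
        = (x :: t).foldl (fun d c => d.modify (counts.getD c 0) [] (· ++ [c]))
          PySem.Dict.empty :=
      List.foldl_map
    have hgetD : bk.getD m0 [] = (x :: t).filter (fun c => counts.getD c 0 == m0) := by
      rw [hbk, ← hpairs, PySem.Dict.getD_foldl_modify_append, List.filter_map, List.map_map]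
      simp [Function.comp_def]
    simp only [Option.getD_some]
    rw [hgetD]
    congr 1
    funext c
    rw [← hm0M]
    by_cases h : counts.getD c 0 = m0 <;> simp [h]

-- main equality
theorem find_best_options_eq (course_lists : List (List String)) :
    find_best_options course_lists = find_best_options_alt course_lists := by
  have hflat : course_lists.flatMap (fun cl => cl) = course_lists.flatten := by
    simp [List.flatMap_def]
  have hcountB : course_lists.flatten.foldl
      (fun d c => d.insert c (d.getD c 0 + 1)) (PySem.Dict.empty : PySem.Dict String Int)
      = PySem.Dict.counter course_lists.flatten := by
    rw [PySem.Dict.counter_eq_foldl]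
    apply PySem.List.foldl_congr_mem
    intro d c _
    simp [PySem.Dict.modify]
  simp only [find_best_options, find_best_options_alt, hflat, count_flatten, hcountB]
  -- B's per-list results, as the filter of the max count
  have hone : ∀ cl ∈ course_lists, ∀ c ∈ cl, 1 ≤ (PySem.Dict.counter course_lists.flatten).getD c 0 := by
    intro cl hcl c hc
    have hcF : c ∈ course_lists.flatten := List.mem_flatten.2 ⟨cl, hcl, hc⟩
    have hpos : 0 < course_lists.flatten.count c := List.count_pos_iff.2 hcF
    rw [PySem.Dict.getD_counter]
    exact_mod_cast hpos
  have hbests : course_lists.map (fun cl => bestOf (PySem.Dict.counter course_lists.flatten) cl)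
      = course_lists.map (pvG course_lists.flatten) := by
    apply List.map_congr_left
    intro cl hcl
    rw [bestOf_eq_filter _ cl (hone cl hcl), pvG]
  -- A's outer loop, as two independent accumulators over the same per-list results
  have houter : course_lists.foldl (fun (st : List String × List (List String)) course_list =>
      if (course_list.foldl (fun (s : List String × Int) course =>
            if (PySem.Dict.counter course_lists.flatten).getD course 0 > s.2 then
              ([course], (PySem.Dict.counter course_lists.flatten).getD course 0)
            else if (PySem.Dict.counter course_lists.flatten).getD course 0 = s.2 then
              (s.1 ++ [course], s.2)
            else s) ([], 0)).1.length = 1 then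
        ((course_list.foldl (fun (s : List String × Int) course =>
            if (PySem.Dict.counter course_lists.flatten).getD course 0 > s.2 then
              ([course], (PySem.Dict.counter course_lists.flatten).getD course 0)
            else if (PySem.Dict.counter course_lists.flatten).getD course 0 = s.2 then
              (s.1 ++ [course], s.2)
            else s) ([], 0)).1.foldl (fun b o => b ++ [o]) st.1, st.2)
      else (st.1, st.2 ++ [(course_list.foldl (fun (s : List String × Int) course =>
            if (PySem.Dict.counter course_lists.flatten).getD course 0 > s.2 then
              ([course], (PySem.Dict.counter course_lists.flatten).getD course 0)
            else if (PySem.Dict.counter course_lists.flatten).getD course 0 = s.2 then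
              (s.1 ++ [course], s.2)
            else s) ([], 0)).1])) ([], [])
    = (course_lists.foldl (fun acc cl =>
        if (pvG course_lists.flatten cl).length = 1 then
          acc ++ [(pvG course_lists.flatten cl).headI] else acc) [],
       course_lists.foldl (fun acc cl =>
        if ¬ ((pvG course_lists.flatten cl).length = 1) then
          acc ++ [pvG course_lists.flatten cl] else acc) []) := by
    rw [← PySem.List.foldl_prod_mk
      (f := fun acc cl =>
        if (pvG course_lists.flatten cl).length = 1 then
          acc ++ [(pvG course_lists.flatten cl).headI] else acc)
      (g := fun acc cl =>
        if ¬ ((pvG course_lists.flatten cl).length = 1) then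
          acc ++ [pvG course_lists.flatten cl] else acc)]
    apply PySem.List.foldl_congr_mem
    intro st cl _
    rw [innerA (fun c => (PySem.Dict.counter course_lists.flatten).getD c 0) cl [] 0]
    have hjunk : (if cl.foldl (fun a c => max a ((PySem.Dict.counter course_lists.flatten).getD c 0)) 0 = 0
        then ([] : List String) else [])
        ++ cl.filter (fun c => decide ((PySem.Dict.counter course_lists.flatten).getD c 0
            = cl.foldl (fun a c => max a ((PySem.Dict.counter course_lists.flatten).getD c 0)) 0))
        = pvG course_lists.flatten cl := by
      rw [pvG]
      split_ifs <;> rfl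
    simp only [hjunk]
    by_cases hlen : (pvG course_lists.flatten cl).length = 1
    · rw [if_pos hlen, if_pos hlen, if_neg (not_not_intro hlen),
        PySem.List.foldl_append_singleton_eq_self,
        headI_singleton (pvG course_lists.flatten cl) hlen]
    · rw [if_neg hlen, if_neg hlen, if_pos hlen]
  rw [houter, hbests]
  rw [PySem.List.foldl_append_ite (fun cl => (pvG course_lists.flatten cl).length = 1)
        (fun cl => (pvG course_lists.flatten cl).headI),
      PySem.List.foldl_append_ite (fun cl => ¬ ((pvG course_lists.flatten cl).length = 1))
        (pvG course_lists.flatten)]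
  simp only [List.nil_append]
  rw [List.filter_map, List.filter_map, List.map_map]
  have hc1 : ((fun b : List String => b.length == 1) ∘ pvG course_lists.flatten)
      = (fun cl => decide ((pvG course_lists.flatten cl).length = 1)) := by
    funext cl
    by_cases h : (pvG course_lists.flatten cl).length = 1 <;> simp [h]
  have hc2 : ((fun b : List String => b.length != 1) ∘ pvG course_lists.flatten)
      = (fun cl => decide (¬ ((pvG course_lists.flatten cl).length = 1))) := by
    funext cl
    by_cases h : (pvG course_lists.flatten cl).length = 1 <;> simp [h]
  have hc3 : ((fun b : List String => b.headI) ∘ pvG course_lists.flatten)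
      = (fun cl => (pvG course_lists.flatten cl).headI) := rfl
  rw [hc1, hc2, hc3]

-- ===== VERDICT (by name: the statement is the Claim_ definition above) =====
theorem find_best_options_spec : Claim_equal_find_best_options := by
  intro course_lists _
  unfold Spec_find_best_options
  exact find_best_options_eq course_lists
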